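-- pv_equiv track=rewrite | github.com/DiegoServinHdn/ChallengeDataEngineer | first_challenge/src/main.py | number_of_answers
-- ===== SOURCE A (Python) =====
-- def get_not_null_key_values(items: list, key: str) -> list:
--     return [i for i in items if i.get(key) is not None]
--
-- def number_of_answers(data: dict) -> dict:
--     """
--     counts the number of answered and not answered items
--
--     Parameters
--     ----------
--     data: dict
--         data with the values to count
--
--
--     Returns
--     -------
--     dict
--         a dictionary with 'answered' and 'not answered' keys
--     """
--     # get items with 'is_answered' key
--     items = get_not_null_key_values(data['items'], 'is_answered')
--     # check if number of items is at least 1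
--     if len(items) <= 0:
--         return {}
--     # initialize keys
--     answers = {'answered': 0, 'not answered': 0}
--     # look for answered and not answered items
--     for i in items:
--         if i.get('is_answered'):
--             answers['answered'] += 1
--         else:
--             answers['not answered'] += 1
--     return answers
-- ===== SOURCE B (Python) =====
-- def number_of_answers(data: dict) -> dict:
--     total = 0
--     answered = 0
--     for i in data['items']:
--         v = i.get('is_answered')
--         if v is not None:
--             total += 1
--             if v:
--                 answered += 1
--     if total == 0:
--         return {}
--     return {'answered': answered, 'not answered': total - answered}
-- ===== Notes on version B (the rewrite author's own statement) =====
-- stated objective: simpler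
-- what changed: Replaces A's filter pass (building an intermediate list) plus a dict-accumulating loop by one fused loop over data['items'] keeping two integer counters, deriving 'not answered' by subtraction.
-- outside the precondition, e.g. on number_of_answers({}): A raises KeyError, B raises KeyError
import Mathlib
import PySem

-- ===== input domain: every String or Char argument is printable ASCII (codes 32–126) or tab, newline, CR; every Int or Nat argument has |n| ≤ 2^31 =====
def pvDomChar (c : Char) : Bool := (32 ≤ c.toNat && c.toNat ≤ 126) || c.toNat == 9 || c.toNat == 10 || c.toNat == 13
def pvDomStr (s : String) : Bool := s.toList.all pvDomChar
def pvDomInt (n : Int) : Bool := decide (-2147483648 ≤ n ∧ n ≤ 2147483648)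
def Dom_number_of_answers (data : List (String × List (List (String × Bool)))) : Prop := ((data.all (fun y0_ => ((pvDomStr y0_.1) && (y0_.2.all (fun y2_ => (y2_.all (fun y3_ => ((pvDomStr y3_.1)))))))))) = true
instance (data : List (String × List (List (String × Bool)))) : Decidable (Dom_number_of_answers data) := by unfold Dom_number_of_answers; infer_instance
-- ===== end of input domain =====

-- B changes A's two-pass shape (filter, then dict-counting loop) into one fused loop with two
-- integer counters, deriving 'not answered' by subtraction; equal output on Pre_ (key 'items' present).

-- ===== PORT A =====
def get_not_null_key_values (items : List (List (String × Bool))) (key : String) :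
    List (List (String × Bool)) :=
  items.filter (fun i => ((PySem.Dict.mk i).get? key).isSome)

def number_of_answers (data : List (String × List (List (String × Bool)))) : List (String × Int) :=
  -- data['items'] raises KeyError when absent: excluded by Pre_; .getD [] is only outside Pre_
  let items := get_not_null_key_values (((PySem.Dict.mk data).get? "items").getD []) "is_answered"
  if items.length ≤ 0 then []
  else
    let answers : PySem.Dict String Int :=
      (PySem.Dict.empty.insert "answered" 0).insert "not answered" 0
    (items.foldl (fun answers i =>
        if ((PySem.Dict.mk i).get? "is_answered").getD false then
          answers.modify "answered" 0 (· + 1)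
        else
          answers.modify "not answered" 0 (· + 1)) answers).items

-- ===== PORT B =====
def number_of_answers_alt (data : List (String × List (List (String × Bool)))) : List (String × Int) :=
  -- data['items'] raises KeyError when absent: excluded by Pre_; .getD [] is only outside Pre_
  let items := ((PySem.Dict.mk data).get? "items").getD []
  let acc := items.foldl (fun (acc : Int × Int) i =>
      match (PySem.Dict.mk i).get? "is_answered" with
      | none => acc
      | some v => (acc.1 + 1, acc.2 + if v then 1 else 0)) (0, 0)
  if acc.1 = 0 then [] else [("answered", acc.2), ("not answered", acc.1 - acc.2)]

-- ===== PRECONDITION & SPEC =====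
-- Pre_ excludes inputs without an 'items' key, on which A (data['items']) raises KeyError.
def Pre_number_of_answers (data : List (String × List (List (String × Bool)))) : Prop :=
  ((PySem.Dict.mk data).get? "items").isSome = true
instance (data : List (String × List (List (String × Bool)))) : Decidable (Pre_number_of_answers data) := by
  unfold Pre_number_of_answers; infer_instance

def pvWitness_number_of_answers : (List (String × List (List (String × Bool)))) :=
  [("items", [[("is_answered", true)], [("is_answered", false)], []])]

def Spec_number_of_answers (data : List (String × List (List (String × Bool)))) (out : List (String × Int)) : Prop := out = number_of_answers_alt data
instance (data : List (String × List (List (String × Bool)))) (out : List (String × Int)) : Decidable (Spec_number_of_answers data out) := by unfold Spec_number_of_answers; infer_instance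

-- ===== CLAIM (what is proved, stated in full; the proofs are below) =====
def Claim_equal_number_of_answers : Prop := ∀ (data : List (String × List (List (String × Bool)))), Dom_number_of_answers data → Pre_number_of_answers data → Spec_number_of_answers data (number_of_answers data)

-- ===== LEMMAS AND PROOFS =====

-- abbreviations for the two tests both programs apply to an item
def pvHasKey (i : List (String × Bool)) : Bool := ((PySem.Dict.mk i).get? "is_answered").isSome
def pvTruthy (i : List (String × Bool)) : Bool := ((PySem.Dict.mk i).get? "is_answered").getD false

lemma pvTruthy_imp_hasKey (i : List (String × Bool)) : pvTruthy i = true → pvHasKey i = true := by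
  unfold pvTruthy pvHasKey
  cases (PySem.Dict.mk i).get? "is_answered" <;> simp

-- B's fused fold computes (#items with the key, #truthy items)
lemma b_fold (l : List (List (String × Bool))) : ∀ (t a : Int),
    l.foldl (fun (acc : Int × Int) i =>
      match (PySem.Dict.mk i).get? "is_answered" with
      | none => acc
      | some v => (acc.1 + 1, acc.2 + if v then 1 else 0)) (t, a)
    = (t + l.countP pvHasKey, a + l.countP pvTruthy) := by
  induction l with
  | nil => simp
  | cons i l ih =>
    intro t a
    simp only [List.foldl_cons, List.countP_cons]
    cases h : (PySem.Dict.mk i).get? "is_answered" with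
    | none =>
      rw [ih, Prod.ext_iff]
      constructor <;> simp [pvHasKey, pvTruthy, h] <;> omega
    | some v =>
      rw [ih, Prod.ext_iff]
      cases v <;> constructor <;> simp [pvHasKey, pvTruthy, h] <;> omega

-- A's dict-accumulating fold over any list, from a two-key literal dict
lemma a_fold (l : List (List (String × Bool))) : ∀ (x y : Int),
    l.foldl (fun answers i =>
        if ((PySem.Dict.mk i).get? "is_answered").getD false then
          PySem.Dict.modify answers "answered" 0 (· + 1)
        else
          PySem.Dict.modify answers "not answered" 0 (· + 1))
      (PySem.Dict.mk [("answered", x), ("not answered", y)])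
    = PySem.Dict.mk [("answered", x + l.countP pvTruthy),
                     ("not answered", y + l.countP (fun i => !pvTruthy i))] := by
  induction l with
  | nil => simp
  | cons i l ih =>
    intro x y
    simp only [List.foldl_cons, List.countP_cons]
    by_cases h : pvTruthy i = true
    · have h' : ((PySem.Dict.mk i).get? "is_answered").getD false = true := h
      rw [if_pos h']
      have hm : PySem.Dict.modify (PySem.Dict.mk [("answered", x), ("not answered", y)])
          "answered" 0 (· + 1) = PySem.Dict.mk [("answered", x + 1), ("not answered", y)] := by
        simp [PySem.Dict.modify, PySem.Dict.contains, PySem.Dict.getD, PySem.Dict.get?,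
              PySem.Dict.insert]
      rw [hm, ih]
      simp [h] <;> omega
    · have h' : ((PySem.Dict.mk i).get? "is_answered").getD false = false := by
        simpa using h
      rw [if_neg (by simp [h'])]
      have hm : PySem.Dict.modify (PySem.Dict.mk [("answered", x), ("not answered", y)])
          "not answered" 0 (· + 1) = PySem.Dict.mk [("answered", x), ("not answered", y + 1)] := by
        simp [PySem.Dict.modify, PySem.Dict.contains, PySem.Dict.getD, PySem.Dict.get?,
              PySem.Dict.insert]
      have hb : pvTruthy i = false := h'
      rw [hm, ih]
      simp [hb] <;> omega

lemma countP_truthy_le (l : List (List (String × Bool))) :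
    l.countP pvTruthy ≤ l.countP pvHasKey :=
  List.countP_mono_left (fun i _ => pvTruthy_imp_hasKey i)

lemma countP_truthy_filter (l : List (List (String × Bool))) :
    (l.filter pvHasKey).countP pvTruthy = l.countP pvTruthy := by
  induction l with
  | nil => rfl
  | cons i l ih =>
    by_cases h : pvHasKey i = true
    · simp [List.filter_cons, h, List.countP_cons, ih]
    · have ht : pvTruthy i = false := by
        cases hq : pvTruthy i
        · rfl
        · exact absurd (pvTruthy_imp_hasKey i hq) h
      simp [List.filter_cons, h, List.countP_cons, ih, ht]

lemma countP_not_truthy_filter (l : List (List (String × Bool))) :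
    (l.filter pvHasKey).countP (fun i => !pvTruthy i)
      = l.countP pvHasKey - l.countP pvTruthy := by
  induction l with
  | nil => rfl
  | cons i l ih =>
    have hle := countP_truthy_le l
    by_cases h : pvHasKey i = true
    · by_cases ht : pvTruthy i = true
      · simp [List.filter_cons, h, List.countP_cons, ih, ht] <;> omega
      · have ht' : pvTruthy i = false := by simpa using ht
        simp [List.filter_cons, h, List.countP_cons, ih, ht'] <;> omega
    · have ht : pvTruthy i = false := by
        cases hq : pvTruthy i
        · rfl
        · exact absurd (pvTruthy_imp_hasKey i hq) h
      simp [List.filter_cons, h, List.countP_cons, ih, ht]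

-- ===== VERDICT (by name: the statement is the Claim_ definition above) =====
theorem number_of_answers_spec : Claim_equal_number_of_answers := by
  intro data _hdom hpre
  obtain ⟨items, hitems⟩ := Option.isSome_iff_exists.mp hpre
  simp only [Spec_number_of_answers, number_of_answers, number_of_answers_alt,
    get_not_null_key_values, hitems, Option.getD_some]
  have hB := b_fold items 0 0
  simp only [zero_add] at hB
  simp only [hB]
  have hcnt : (items.filter (fun i => ((PySem.Dict.mk i).get? "is_answered").isSome)).length
      = items.countP pvHasKey := by
    rw [List.countP_eq_length_filter]; rfl
  have hAf := a_fold (items.filter pvHasKey) 0 0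
  simp only [zero_add] at hAf
  have hT := countP_truthy_le items
  by_cases hz : items.countP pvHasKey = 0
  · rw [if_pos (by rw [hcnt]; omega), if_pos (by simp [hz])]
  · rw [if_neg (by rw [hcnt]; omega), if_neg (by intro hq; simp at hq; exact hz (List.countP_eq_zero.mpr (by simpa using hq)))]
    have hstart : (PySem.Dict.empty.insert "answered" (0 : Int)).insert "not answered" 0
        = PySem.Dict.mk [("answered", 0), ("not answered", 0)] := by rfl
    rw [hstart]
    have hsame : (items.filter (fun i => ((PySem.Dict.mk i).get? "is_answered").isSome))
        = items.filter pvHasKey := rfl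
    rw [hsame, hAf]
    simp only [PySem.Dict.items]
    rw [countP_truthy_filter, countP_not_truthy_filter]
    simp
    push_cast
    omega
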